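-- pv_equiv track=rewrite | github.com/MaherDeeb/TGS-Salt-Identification-Challenge | submission.py | _arrage_data_for_submission
-- ===== SOURCE A (Python) =====
-- def _arrage_data_for_submission(reshaped_mask):
--
--     # this a list of start positions and length where the mask value >0
--     salt_positions = []
--     #initiate the start postion of 1s values of the mask
--     start_pos = 1
--     # this is a tracker to count how many 1s after the start positon
--     tracker = 0
--
--     #check it value of the mask picture after reshaping it
--     for pixel_i in reshaped_mask:
--         if (pixel_i == 0):
--             if tracker != 0:
--                 # the current bunch of value>0 finish here and we add it to the
--                 # the finial results
--                 salt_positions.append((start_pos, tracker))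
--                 # the next position may start from here if the next value >0
--                 # otherwise it will be corrected in other places
--                 start_pos += tracker
--                 # reset the tracker
--                 tracker = 0
--             # if the current value is 0, the start positon it not in this point
--             start_pos += 1
--         else:
--             # if the tracker is >0 we go further
--             tracker += 1
--     # in case of the last value of pixel_i, if tracker still >0, it means we
--     # miss registering the last record
--     if tracker != 0:
--         salt_positions.append((start_pos, tracker))
--         start_pos += tracker
--         tracker = 0
--
--     return salt_positions
-- ===== SOURCE B (Python) =====
-- def _arrage_data_for_submission(reshaped_mask):
--     # Decompose the mask into maximal runs of equal key (zero / nonzero),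
--     # emitting (start, length) for each nonzero run; no tracker/flush state.
--     salt_positions = []
--     pos = 1
--     xs = reshaped_mask
--     while xs:
--         run = 1
--         while run < len(xs) and (xs[run] == 0) == (xs[0] == 0):
--             run += 1
--         if xs[0] != 0:
--             salt_positions.append((pos, run))
--         pos += run
--         xs = xs[run:]
--     return salt_positions
-- ===== Notes on version B (the rewrite author's own statement) =====
-- stated objective: alternative
-- what changed: Replaces A's per-pixel start_pos/tracker state machine with end-of-loop flush by a run decomposition: scan the maximal run of equal key (zero/nonzero) at the front, emit (pos, length) for nonzero runs, advance, repeat.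
import Mathlib
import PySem

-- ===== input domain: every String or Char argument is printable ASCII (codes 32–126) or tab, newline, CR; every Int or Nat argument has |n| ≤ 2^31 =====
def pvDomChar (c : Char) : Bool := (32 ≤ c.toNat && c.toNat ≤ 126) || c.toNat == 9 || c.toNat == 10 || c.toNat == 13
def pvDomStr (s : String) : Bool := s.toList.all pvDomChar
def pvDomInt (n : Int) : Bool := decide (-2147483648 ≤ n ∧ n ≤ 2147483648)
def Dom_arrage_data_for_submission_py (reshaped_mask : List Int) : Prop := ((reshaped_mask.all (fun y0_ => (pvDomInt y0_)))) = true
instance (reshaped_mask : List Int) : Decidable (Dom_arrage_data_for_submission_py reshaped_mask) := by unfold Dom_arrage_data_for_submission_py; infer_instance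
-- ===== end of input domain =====

-- B replaces A's start_pos/tracker state machine and end-of-loop flush with a
-- run decomposition (maximal zero/nonzero runs, emitted directly); objective: alternative.

-- ===== PORT A =====
-- one loop step of A: state = (salt_positions, start_pos, tracker)
def pvAStep (st : List (Int × Int) × Int × Int) (pixel : Int) : List (Int × Int) × Int × Int :=
  if pixel = 0 then
    if st.2.2 ≠ 0 then (st.1 ++ [(st.2.1, st.2.2)], st.2.1 + st.2.2 + 1, 0)
    else (st.1, st.2.1 + 1, st.2.2)
  else (st.1, st.2.1, st.2.2 + 1)

-- A's trailing "if tracker != 0" flush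
def pvAFlush (st : List (Int × Int) × Int × Int) : List (Int × Int) :=
  if st.2.2 ≠ 0 then st.1 ++ [(st.2.1, st.2.2)] else st.1

def arrage_data_for_submission_py (reshaped_mask : List Int) : List (Int × Int) :=
  pvAFlush (reshaped_mask.foldl pvAStep ([], 1, 0))

-- ===== PORT B =====
-- port of B's inner while: length of the maximal further prefix whose key (x == 0) is b
def pvRun (b : Bool) : List Int → Nat
  | [] => 0
  | x :: xs => if decide (x = 0) = b then 1 + pvRun b xs else 0

-- port of B's outer while: consume one maximal run, emit it if nonzero, advance pos
def pvAltGo (pos : Int) : List Int → List (Int × Int)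
  | [] => []
  | x :: xs =>
    let r : Nat := 1 + pvRun (decide (x = 0)) xs
    let rest := pvAltGo (pos + (r : Int)) (xs.drop (r - 1))
    if x ≠ 0 then (pos, (r : Int)) :: rest else rest
termination_by l => l.length
decreasing_by
  simp only [List.length_drop, List.length_cons]
  omega

def arrage_data_for_submission_py_alt (reshaped_mask : List Int) : List (Int × Int) :=
  pvAltGo 1 reshaped_mask

-- ===== PRECONDITION & SPEC =====
def Spec_arrage_data_for_submission_py (reshaped_mask : List Int) (out : List (Int × Int)) : Prop := out = arrage_data_for_submission_py_alt reshaped_mask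
instance (reshaped_mask : List Int) (out : List (Int × Int)) : Decidable (Spec_arrage_data_for_submission_py reshaped_mask out) := by unfold Spec_arrage_data_for_submission_py; infer_instance

-- ===== CLAIM (what is proved, stated in full; the proofs are below) =====
def Claim_equal_arrage_data_for_submission_py : Prop := ∀ (reshaped_mask : List Int), Dom_arrage_data_for_submission_py reshaped_mask → Spec_arrage_data_for_submission_py reshaped_mask (arrage_data_for_submission_py reshaped_mask)

-- ===== LEMMAS AND PROOFS =====

-- B's result when A is in the middle of a nonzero run started at `start` with `tr` pixels so far
def pvRunCont (start tr : Int) (xs : List Int) : List (Int × Int) :=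
  (start, tr + (pvRun false xs : Int)) ::
    pvAltGo (start + tr + (pvRun false xs : Int) + 1) (xs.drop (pvRun false xs + 1))

lemma pvAltGo_nil (p : Int) : pvAltGo p [] = [] := by simp [pvAltGo]

lemma pvDropCons {α : Type} (k : Nat) (x : α) (xs : List α) :
    List.drop (1 + k) (x :: xs) = List.drop k xs := by
  rw [Nat.add_comm]; exact List.drop_succ_cons

lemma pvAltGo_cons (p : Int) (x : Int) (xs : List Int) :
    pvAltGo p (x :: xs) =
      (if x ≠ 0 then
        [(p, ((1 + pvRun (decide (x = 0)) xs : Nat) : Int))] else []) ++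
      pvAltGo (p + ((1 + pvRun (decide (x = 0)) xs : Nat) : Int))
        (xs.drop (pvRun (decide (x = 0)) xs)) := by
  rw [pvAltGo]
  by_cases hx : x = 0 <;> simp [hx]

lemma pvAltGo_zeroSkip (xs : List Int) (p : Int) :
    pvAltGo p xs = pvAltGo (p + (pvRun true xs : Int)) (xs.drop (pvRun true xs)) := by
  cases xs with
  | nil => simp [pvAltGo_nil]
  | cons x xs =>
    by_cases hx : x = 0
    · subst hx
      have hr : pvRun true ((0 : Int) :: xs) = 1 + pvRun true xs := by simp [pvRun]
      rw [pvAltGo_cons, hr, pvDropCons]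
      simp
    · have : pvRun true (x :: xs) = 0 := by simp [pvRun, hx]
      simp [this]

lemma pvAltGo_zeroStep (p : Int) (xs : List Int) :
    pvAltGo p (0 :: xs) = pvAltGo (p + 1) xs := by
  rw [pvAltGo_cons, pvAltGo_zeroSkip xs (p + 1)]
  simp only [decide_true, ne_eq, not_true_eq_false, if_false, List.nil_append]
  congr 1
  push_cast
  ring

lemma pvAltGo_dropRun (xs : List Int) (p : Int) :
    pvAltGo p (xs.drop (pvRun false xs)) = pvAltGo (p + 1) (xs.drop (pvRun false xs + 1)) := by
  induction xs generalizing p with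
  | nil => simp [pvAltGo_nil]
  | cons x xs ih =>
    by_cases hx : x = 0
    · subst hx
      have h0 : pvRun false (0 :: xs) = 0 := by simp [pvRun]
      simp only [h0, List.drop_zero, Nat.zero_add, List.drop_succ_cons, List.drop_zero]
      exact pvAltGo_zeroStep p xs
    · have h1 : pvRun false (x :: xs) = 1 + pvRun false xs := by simp [pvRun, hx]
      rw [h1]
      rw [show (1 + pvRun false xs + 1) = 1 + (pvRun false xs + 1) from by omega]
      rw [pvDropCons, pvDropCons]
      exact ih p

-- the loop invariant: A's fold-then-flush from any reachable state, versus B's runs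
lemma pvMain (xs : List Int) (acc : List (Int × Int)) (start tr : Int) (htr : 0 ≤ tr) :
    pvAFlush (xs.foldl pvAStep (acc, start, tr)) =
      acc ++ (if tr = 0 then pvAltGo start xs else pvRunCont start tr xs) := by
  induction xs generalizing acc start tr with
  | nil =>
    by_cases h : tr = 0
    · simp [pvAFlush, h, pvAltGo_nil]
    · simp [pvAFlush, h, pvRunCont, pvRun, pvAltGo_nil]
  | cons x xs ih =>
    by_cases hx : x = 0
    · subst hx
      by_cases h : tr = 0
      · subst h
        have hstep : pvAStep (acc, start, (0 : Int)) 0 = (acc, start + 1, 0) := by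
          simp [pvAStep]
        simp only [List.foldl_cons, hstep, ih acc (start + 1) 0 le_rfl]
        simp [pvAltGo_zeroStep]
      · have hstep : pvAStep (acc, start, tr) 0 = (acc ++ [(start, tr)], start + tr + 1, 0) := by
          simp [pvAStep, h]
        simp only [List.foldl_cons, hstep, ih (acc ++ [(start, tr)]) (start + tr + 1) 0 le_rfl]
        simp only [if_neg h, if_pos rfl, pvRunCont]
        have h0 : pvRun false ((0 : Int) :: xs) = 0 := by simp [pvRun]
        simp [h0]
    · have hstep : pvAStep (acc, start, tr) x = (acc, start, tr + 1) := by
        simp [pvAStep, hx]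
      have htr1 : tr + 1 ≠ 0 := by omega
      simp only [List.foldl_cons, hstep, ih acc start (tr + 1) (by omega), if_neg htr1]
      by_cases h : tr = 0
      · subst h
        simp only [if_pos rfl]
        congr 1
        have hd : decide (x = 0) = false := by simp [hx]
        rw [pvAltGo_cons, hd]
        simp only [ne_eq, hx, not_false_iff, if_pos, List.singleton_append]
        unfold pvRunCont
        rw [pvAltGo_dropRun]
        congr 1
        all_goals first
          | (congr 1 <;> (try push_cast) <;> (try ring))
          | (push_cast; ring)
      · simp only [if_neg h]
        congr 1
        unfold pvRunCont
        have h1 : pvRun false (x :: xs) = 1 + pvRun false xs := by simp [pvRun, hx]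
        rw [h1]
        rw [show (1 + pvRun false xs + 1) = 1 + (pvRun false xs + 1) from by omega]
        rw [pvDropCons]
        congr 1
        all_goals first
          | (congr 1 <;> (try push_cast) <;> (try ring))
          | (push_cast; ring)

-- ===== VERDICT (by name: the statement is the Claim_ definition above) =====
theorem arrage_data_for_submission_py_spec : Claim_equal_arrage_data_for_submission_py := by
  intro xs _
  unfold Spec_arrage_data_for_submission_py arrage_data_for_submission_py arrage_data_for_submission_py_alt
  have := pvMain xs [] 1 0 le_rfl
  simpa using this
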